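-- pv_equiv track=rewrite | github.com/AmineProjetInfoEnsai/TP1-web-crawler | TP3/search_engine.py | documents_with_all_tokens
-- ===== SOURCE A (Python) =====
-- def documents_with_all_tokens(tokens: list[str], index: dict) -> set[str]:
--     """
--     Retourne les documents contenant tous les tokens (hors stopwords).
--
--     Paramètres
--     ----------
--     tokens : list[str]
--     index : dict
--
--     Retour
--     ------
--     set[str]
--     """
--     doc_sets = []
--
--     for token in tokens:
--         if token in index:
--             doc_sets.append(set(index[token]))
--         else:
--             # Si un token est absent de l'index → aucun document possible
--             return set()
--
--     # Intersection de tous les ensembles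
--     return set.intersection(*doc_sets) if doc_sets else set()
-- ===== SOURCE B (Python) =====
-- def documents_with_all_tokens(tokens: list[str], index: dict) -> set[str]:
--     counts = {}
--     for token in tokens:
--         if token not in index:
--             return set()
--         for doc in set(index[token]):
--             counts[doc] = counts.get(doc, 0) + 1
--     return {doc for doc, c in counts.items() if c == len(tokens)}
-- ===== Notes on version B (the rewrite author's own statement) =====
-- stated objective: alternative
-- what changed: Replaces building a list of posting sets and taking their n-way set intersection with a single counting pass: a dict tallies, per document, in how many tokens' (deduplicated) posting lists it occurs, and the result is the documents whose tally equals len(tokens); the missing-token early return is kept.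
import Mathlib
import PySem

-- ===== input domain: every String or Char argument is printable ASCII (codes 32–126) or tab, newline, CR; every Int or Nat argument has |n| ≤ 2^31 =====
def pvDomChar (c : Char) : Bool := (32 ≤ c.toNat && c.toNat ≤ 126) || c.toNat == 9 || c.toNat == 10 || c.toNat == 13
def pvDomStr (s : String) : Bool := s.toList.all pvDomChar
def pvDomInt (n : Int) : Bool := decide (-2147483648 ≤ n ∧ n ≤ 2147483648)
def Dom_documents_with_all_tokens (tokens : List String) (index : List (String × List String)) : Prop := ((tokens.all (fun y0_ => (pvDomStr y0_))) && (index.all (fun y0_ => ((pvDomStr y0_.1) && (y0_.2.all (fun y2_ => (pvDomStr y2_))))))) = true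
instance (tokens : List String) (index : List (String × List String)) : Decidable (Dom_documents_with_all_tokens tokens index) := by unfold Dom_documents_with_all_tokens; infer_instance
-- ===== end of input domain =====

-- B replaces A's n-way set intersection with a single counting pass (tally per document, keep tallies equal to len(tokens)); same cost, alternative algorithm.


-- ===== PORT A =====
-- the 'for token in tokens' loop building doc_sets; 'none' is the early 'return set()'
def pvAgather (index : List (String × List String)) : List String → List (PySem.Set String) → Option (List (PySem.Set String))
  | [], docSets => some docSets
  | t :: ts, docSets =>
    match index.lookup t with
    | some postings => pvAgather index ts (docSets ++ [PySem.Set.ofList postings])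
    | none => none

def documents_with_all_tokens (tokens : List String) (index : List (String × List String)) : List String :=
  match pvAgather index tokens [] with
  | none => []                                   -- a token was absent: return set()
  | some [] => []                                -- 'if doc_sets else set()'
  | some (s :: rest) => rest.foldl PySem.Set.inter s   -- set.intersection(*doc_sets)

-- ===== PORT B =====
-- the counting loop over tokens; 'none' is the early 'return set()'
def pvBcount (index : List (String × List String)) : List String → PySem.Dict String Int → Option (PySem.Dict String Int)
  | [], counts => some counts
  | t :: ts, counts =>
    match index.lookup t with
    | some postings =>
        pvBcount index ts
          ((PySem.Set.ofList postings).foldl (fun c doc => c.insert doc (c.getD doc 0 + 1)) counts)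
    | none => none

def documents_with_all_tokens_alt (tokens : List String) (index : List (String × List String)) : List String :=
  match pvBcount index tokens PySem.Dict.empty with
  | none => []
  | some counts =>
      ((counts.items.filter (fun p => p.2 == (tokens.length : Int))).map (fun p => p.1))

-- ===== PRECONDITION & SPEC =====
def Spec_documents_with_all_tokens (tokens : List String) (index : List (String × List String)) (out : List String) : Prop := out = documents_with_all_tokens_alt tokens index
instance (tokens : List String) (index : List (String × List String)) (out : List String) : Decidable (Spec_documents_with_all_tokens tokens index out) := by unfold Spec_documents_with_all_tokens; infer_instance

-- ===== CLAIM (what is proved, stated in full; the proofs are below) =====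
def Claim_equal_documents_with_all_tokens : Prop := ∀ (tokens : List String) (index : List (String × List String)), Dom_documents_with_all_tokens tokens index → Spec_documents_with_all_tokens tokens index (documents_with_all_tokens tokens index)

-- ===== LEMMAS AND PROOFS =====


-- look up every token's posting list; none iff some token is absent
def pvCollect (index : List (String × List String)) : List String → Option (List (List String))
  | [] => some []
  | t :: ts =>
    match index.lookup t with
    | some p => (pvCollect index ts).map (p :: ·)
    | none => none

theorem pvAgather_eq (index : List (String × List String)) (ts : List String) :
    ∀ acc, pvAgather index ts acc =
      (pvCollect index ts).map (fun ls => acc ++ ls.map PySem.Set.ofList) := by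
  induction ts with
  | nil => intro acc; simp [pvAgather, pvCollect]
  | cons t ts ih =>
    intro acc
    simp only [pvAgather, pvCollect]
    cases index.lookup t with
    | none => rfl
    | some p =>
      dsimp only
      rw [ih]
      cases pvCollect index ts <;> simp

theorem pvBcount_eq (index : List (String × List String)) (ts : List String) :
    ∀ counts, pvBcount index ts counts =
      (pvCollect index ts).map (fun ls =>
        ((ls.map PySem.Set.ofList).flatten).foldl
          (fun c doc => c.insert doc (c.getD doc 0 + 1)) counts) := by
  induction ts with
  | nil => intro counts; simp [pvBcount, pvCollect]
  | cons t ts ih =>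
    intro counts
    simp only [pvBcount, pvCollect]
    cases index.lookup t with
    | none => rfl
    | some p =>
      dsimp only
      rw [ih]
      cases pvCollect index ts <;> simp [List.foldl_append]

theorem pvCollect_length (index : List (String × List String)) (ts : List String) :
    ∀ ls, pvCollect index ts = some ls → ls.length = ts.length := by
  induction ts with
  | nil => intro ls h; simp [pvCollect] at h; simp [← h]
  | cons t ts ih =>
    intro ls h
    simp only [pvCollect] at h
    cases hl : index.lookup t with
    | none => rw [hl] at h; exact absurd h (by simp)
    | some p =>
      rw [hl] at h
      cases hc : pvCollect index ts with
      | none => rw [hc] at h; exact absurd h (by simp)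
      | some ls' =>
        rw [hc] at h
        simp at h
        simp [← h, ih ls' hc]

-- foldl of set intersection is one filter over the first set
theorem pvFoldlInter (sets : List (PySem.Set String)) :
    ∀ s : PySem.Set String, sets.foldl PySem.Set.inter s =
      s.filter (fun x => sets.all (fun t => PySem.Set.contains t x)) := by
  induction sets with
  | nil => intro s; simp
  | cons t rest ih =>
    intro s
    rw [List.foldl_cons, ih]
    show (PySem.Set.inter s t).filter _ = _
    rw [PySem.Set.inter, List.filter_filter]
    simp [Bool.and_comm]

-- filtering a Set.update by a predicate that forces membership in the base set ignores the added elements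
theorem pvFilterUpdate (l : List String) :
    ∀ (s : PySem.Set String) (q : String → Bool), (∀ x, q x = true → x ∈ s) →
      (PySem.Set.update s l).filter q = s.filter q := by
  induction l with
  | nil => intro s q _; rfl
  | cons x l ih =>
    intro s q h
    show List.filter q (List.foldl PySem.Set.add (PySem.Set.add s x) l) = List.filter q s
    by_cases hc : PySem.Set.contains s x = true
    · rw [PySem.Set.add, if_pos hc]; exact ih s q h
    · rw [PySem.Set.add, if_neg hc]
      have hx : x ∉ s := by simpa [PySem.Set.contains] using hc
      have hqx : q x = false := by
        cases hq : q x with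
        | false => rfl
        | true => exact absurd (h x hq) hx
      have := ih (s ++ [x]) q (fun y hy => List.mem_append_left _ (h y hy))
      simp only [PySem.Set.update] at this
      rw [this, List.filter_append]
      simp [hqx]

-- the count of x in a deduplicated posting list is 0 or 1
theorem pvCountOfList (x : String) (p : List String) :
    (PySem.Set.ofList p).count x = if x ∈ PySem.Set.ofList p then 1 else 0 := by
  split
  · exact List.count_eq_one_of_mem (PySem.Set.nodup_ofList p) (by assumption)
  · exact List.count_eq_zero.mpr (by assumption)

-- the tally of x over the concatenated deduplicated posting lists is at most their number
theorem pvRestLe (x : String) (ps : List (List String)) :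
    ((ps.map PySem.Set.ofList).flatten).count x ≤ ps.length := by
  induction ps with
  | nil => simp
  | cons p ps ih =>
    simp only [List.map_cons, List.flatten_cons, List.count_append, List.length_cons]
    have h1 : (PySem.Set.ofList p).count x ≤ 1 := by
      rw [pvCountOfList]; split <;> omega
    omega

-- the tally equals the number of posting lists iff every deduplicated posting list contains x
theorem pvAllIff (x : String) (ps : List (List String)) :
    (((ps.map PySem.Set.ofList).flatten).count x = ps.length) ↔
      ((ps.map PySem.Set.ofList).all (fun t => PySem.Set.contains t x) = true) := by
  induction ps with
  | nil => simp
  | cons p ps ih =>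
    simp only [List.map_cons, List.flatten_cons, List.count_append, List.length_cons,
      List.all_cons, Bool.and_eq_true]
    have hle := pvRestLe x ps
    have hc := pvCountOfList x p
    have hcontains : (PySem.Set.contains (PySem.Set.ofList p) x = true) ↔ x ∈ PySem.Set.ofList p := by
      simp [PySem.Set.contains]
    by_cases hm : x ∈ PySem.Set.ofList p
    · simp only [hm, if_pos] at hc
      constructor
      · intro h; exact ⟨hcontains.mpr hm, ih.mp (by omega)⟩
      · intro ⟨_, h2⟩; have := ih.mpr h2; omega
    · simp only [hm, if_neg, not_false_iff] at hc
      constructor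
      · intro h; omega
      · intro ⟨h1, _⟩; exact absurd (hcontains.mp h1) hm

-- ===== VERDICT (by name: the statement is the Claim_ definition above) =====
theorem documents_with_all_tokens_spec : Claim_equal_documents_with_all_tokens := by
  intro tokens index _
  show documents_with_all_tokens tokens index = documents_with_all_tokens_alt tokens index
  unfold documents_with_all_tokens documents_with_all_tokens_alt
  rw [pvAgather_eq, pvBcount_eq]
  cases hc : pvCollect index tokens with
  | none => rfl
  | some ls =>
    have hlen := pvCollect_length index tokens ls hc
    cases ls with
    | nil =>
      simp only [Option.map_some, List.map_nil, List.flatten_nil, List.foldl_nil, List.nil_append]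
      rfl
    | cons p ps =>
      simp only [Option.map_some, List.map_cons, List.flatten_cons, List.nil_append]
      have hn : tokens.length = ps.length + 1 := by simpa using hlen.symm
      rw [pvFoldlInter, PySem.Dict.foldl_insert_getD_add_one_eq_counter,
        PySem.Dict.items_counter, List.filter_map, List.map_map]
      rw [show (PySem.Set.ofList (PySem.Set.ofList p ++ (List.map PySem.Set.ofList ps).flatten)) =
            PySem.Set.update (PySem.Set.ofList p) ((List.map PySem.Set.ofList ps).flatten) from by
        rw [PySem.Set.ofList_append, PySem.Set.ofList_ofList]]
      dsimp only [Function.comp_def]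
      rw [List.map_id']
      rw [pvFilterUpdate ((List.map PySem.Set.ofList ps).flatten) (PySem.Set.ofList p)
        (fun k => ((List.count k (PySem.Set.ofList p ++ (List.map PySem.Set.ofList ps).flatten) : Int) == (tokens.length : Int)))
        (by
          intro x hx
          rw [beq_iff_eq, Nat.cast_inj] at hx
          by_contra hm
          have h0 : (PySem.Set.ofList p).count x = 0 := List.count_eq_zero.mpr hm
          have hr := pvRestLe x ps
          rw [List.count_append] at hx
          omega)]
      refine List.filter_congr ?_
      intro x hx
      have h1 : (PySem.Set.ofList p).count x = 1 :=
        List.count_eq_one_of_mem (PySem.Set.nodup_ofList p) hx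
      have hall := pvAllIff x ps
      have hr := pvRestLe x ps
      rw [Bool.eq_iff_iff, beq_iff_eq, Nat.cast_inj, List.count_append, h1, hn, ← hall]
      omega
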